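-- pv_equiv track=rewrite | github.com/NilTimofeev/Algorithms | lesson_2/not_sieve.py | not_sieve_2
-- ===== SOURCE A (Python) =====
-- def not_sieve_2(find_num):
--     """
--     В этом варианте отсеем четные числа и кратные 5. Видим многократный прирост скорости
--
--     python -m timeit -n 1000 -s "import not_sieve" "not_sieve.not_sieve_2(100)"
--     1000 loops, best of 5: 254 usec per loop
--
--     python -m timeit -n 1000 -s "import not_sieve" "not_sieve.not_sieve_2(200)"
--     1000 loops, best of 5: 954 usec per loop
--
--     lesson_2>python -m timeit -n 1000 -s "import not_sieve" "not_sieve.not_sieve_2(300)"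
--     1000 loops, best of 5: 2.1 msec per loop
--     """
--     if find_num == 1:
--         return 2
--     if find_num == 2:
--         return 3
--     val = 4
--     find_num -= 2
--     prime_num = True
--     while True:
--         val += 1
--         for j in range(3, val // 2 + 1):
--             if val % 2 == 0 or val % 5 == 0:
--                 continue
--             if val % j == 0:
--                 prime_num = False
--                 break
--         if prime_num:
--             find_num -= 1
--         prime_num = True
--         if find_num == 0:
--             break
--     return val
-- ===== SOURCE B (Python) =====
-- def not_sieve_2(find_num):
--     # Same sequence as A (evens, multiples of 5, and primes, scanned from 5),
--     # but each candidate is judged by sqrt-bounded trial division instead of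
--     # A's scan of every j up to val//2, and non-counted values are stepped over.
--     if find_num == 1:
--         return 2
--     if find_num == 2:
--         return 3
--
--     def counted(v):
--         if v % 2 == 0 or v % 5 == 0:
--             return True
--         d = 3
--         while d * d <= v:
--             if v % d == 0:
--                 return False
--             d += 2
--         return True
--
--     remaining = find_num - 2
--     val = 4
--     while True:
--         val = val + 1 if counted(val + 1) else val + 2
--         remaining -= 1
--         if remaining == 0:
--             return val
-- ===== Notes on version B (the rewrite author's own statement) =====
-- stated objective: faster
-- what changed: Replaces A's per-candidate trial division over every j in [3, val//2] (which A runs in full even for even numbers and multiples of 5) by an O(sqrt(v)) odd-divisor primality test applied only to odd non-multiples-of-5, with a skip-by-2 scan over candidates; Pre_ excludes find_num <= 0, on which A's while-loop never terminates.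
import Mathlib
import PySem

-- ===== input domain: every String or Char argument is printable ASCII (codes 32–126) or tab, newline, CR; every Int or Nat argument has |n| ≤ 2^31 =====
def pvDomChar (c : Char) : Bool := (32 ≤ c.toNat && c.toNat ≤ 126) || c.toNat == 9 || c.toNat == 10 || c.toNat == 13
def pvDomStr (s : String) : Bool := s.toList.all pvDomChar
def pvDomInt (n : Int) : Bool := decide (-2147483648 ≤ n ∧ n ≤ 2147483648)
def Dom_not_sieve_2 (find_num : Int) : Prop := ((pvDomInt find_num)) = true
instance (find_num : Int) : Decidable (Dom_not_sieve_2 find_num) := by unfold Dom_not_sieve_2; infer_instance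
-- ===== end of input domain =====

-- B replaces A's full scan of j ∈ [3, val//2] per candidate by a sqrt-bounded
-- odd-divisor test applied only to odd non-multiples-of-5, stepping over
-- rejected candidates; measured faster in a timing run.

-- ===== PORT A =====
-- the 'for j in range(3, val//2+1)' loop with its continue/break, result = prime_num
def notSieveInnerA (val : Int) : List Int → Bool
  | [] => true
  | j :: rest =>
      if PySem.Int.mod val 2 == 0 || PySem.Int.mod val 5 == 0 then
        notSieveInnerA val rest
      else if PySem.Int.mod val j == 0 then
        false
      else
        notSieveInnerA val rest

-- the 'while True' loop; fuel only makes it total (2*(find_num-2) iterations always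
-- suffice on Pre_, proved below); on fuel exhaustion (outside Pre_) returns val
def notSieveLoopA (fuel : Nat) (val find_num : Int) : Int :=
  match fuel with
  | 0 => val
  | fuel + 1 =>
    let val := val + 1
    let prime_num := notSieveInnerA val (PySem.List.pyRange 3 (PySem.Int.floordiv val 2 + 1) 1)
    let find_num := if prime_num then find_num - 1 else find_num
    if find_num == 0 then val else notSieveLoopA fuel val find_num

def not_sieve_2 (find_num : Int) : Int :=
  if find_num == 1 then 2
  else if find_num == 2 then 3
  else notSieveLoopA (2 * (find_num - 2)).toNat 4 (find_num - 2)

-- ===== PORT B =====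
-- the 'while d * d <= v' trial-division loop of B's counted()
def trialB (v d : Int) : Bool :=
  if h : d * d ≤ v then
    if PySem.Int.mod v d == 0 then false
    else trialB v (d + 2)
  else true
termination_by (v + 1 - d).toNat
decreasing_by
  have h1 : 2 * d - 1 ≤ v := by nlinarith
  have h2 : 0 ≤ v := by nlinarith
  omega

def countedB (v : Int) : Bool :=
  if PySem.Int.mod v 2 == 0 || PySem.Int.mod v 5 == 0 then true
  else trialB v 3

-- B's 'while True' loop: remaining counts down by exactly 1 each turn
def notSieveLoopB : Nat → Int → Int
  | 0, val => val
  | n + 1, val =>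
      let val' := if countedB (val + 1) then val + 1 else val + 2
      notSieveLoopB n val'

def not_sieve_2_alt (find_num : Int) : Int :=
  if find_num == 1 then 2
  else if find_num == 2 then 3
  else notSieveLoopB (find_num - 2).toNat 4

-- ===== PRECONDITION & SPEC =====
-- A's while-loop never terminates for find_num ≤ 0 (the counter starts negative and
-- only decreases), so Pre_ admits exactly the inputs on which A returns: find_num ≥ 1.
def Pre_not_sieve_2 (find_num : Int) : Prop := 1 ≤ find_num
instance (find_num : Int) : Decidable (Pre_not_sieve_2 find_num) := by unfold Pre_not_sieve_2; infer_instance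
def pvWitness_not_sieve_2 : Int := 5

def Spec_not_sieve_2 (find_num : Int) (out : Int) : Prop := out = not_sieve_2_alt find_num
instance (find_num : Int) (out : Int) : Decidable (Spec_not_sieve_2 find_num out) := by unfold Spec_not_sieve_2; infer_instance

-- ===== CLAIM (what is proved, stated in full; the proofs are below) =====
def Claim_equal_not_sieve_2 : Prop := ∀ (find_num : Int), Dom_not_sieve_2 find_num → Pre_not_sieve_2 find_num → Spec_not_sieve_2 find_num (not_sieve_2 find_num)

-- ===== LEMMAS AND PROOFS =====

-- evens and multiples of 5 pass A's inner loop untouched (every iteration 'continue's)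
lemma innerA_true (val : Int) (h : PySem.Int.mod val 2 = 0 ∨ PySem.Int.mod val 5 = 0) :
    ∀ l : List Int, notSieveInnerA val l = true := by
  intro l
  induction l with
  | nil => rfl
  | cons j rest ih =>
      have hcond : (PySem.Int.mod val 2 == 0 || PySem.Int.mod val 5 == 0) = true := by
        rcases h with h | h
        · rw [show (PySem.Int.mod val 2 == 0) = true by rw [beq_iff_eq]; exact h, Bool.true_or]
        · rw [show (PySem.Int.mod val 5 == 0) = true by rw [beq_iff_eq]; exact h, Bool.or_true]
      simp only [notSieveInnerA, hcond, if_true]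
      exact ih

-- otherwise A's inner loop is a divisor search over its list
lemma innerA_char (val : Int) (h2 : ¬ PySem.Int.mod val 2 = 0) (h5 : ¬ PySem.Int.mod val 5 = 0) :
    ∀ l : List Int, notSieveInnerA val l = true ↔ ∀ j ∈ l, ¬ PySem.Int.mod val j = 0 := by
  intro l
  induction l with
  | nil => simp [notSieveInnerA]
  | cons j rest ih =>
      have hcond : (PySem.Int.mod val 2 == 0 || PySem.Int.mod val 5 == 0) = false := by
        simp only [Bool.or_eq_false_iff, beq_eq_false_iff_ne, ne_eq]
        exact ⟨h2, h5⟩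
      by_cases hj : PySem.Int.mod val j = 0
      · simp only [notSieveInnerA, hcond, Bool.false_eq_true, if_false, hj, beq_self_eq_true,
          if_true]
        constructor
        · intro h; exact absurd h (by simp)
        · intro h; exact absurd hj (h j (List.mem_cons_self))
      · simp only [notSieveInnerA, hcond, Bool.false_eq_true, if_false,
          beq_iff_eq, hj, if_false, ih, List.mem_cons]
        constructor
        · rintro h x (rfl | hx)
          · exact hj
          · exact h x hx
        · intro h x hx; exact h x (Or.inr hx)

-- B's while-loop is a divisor search over the odd numbers d, d+2, … up to √v
lemma trialB_char (v : Int) : ∀ d : Int, 3 ≤ d →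
    (trialB v d = true ↔
      ∀ i : Nat, (d + 2*(i:Int)) * (d + 2*(i:Int)) ≤ v → ¬ PySem.Int.mod v (d + 2*(i:Int)) = 0) := by
  intro d
  induction d using trialB.induct v with
  | case1 d hle hmod =>
      intro _
      have hm : PySem.Int.mod v d = 0 := by simpa using hmod
      rw [trialB]
      simp only [hle, dite_true, hmod, if_true]
      constructor
      · intro h; exact absurd h (by simp)
      · intro h
        exact absurd hm (by simpa using h 0 (by simpa using hle))
  | case2 d hle hmod ih =>
      intro hd
      rw [trialB]
      have hm : ¬ PySem.Int.mod v d = 0 := by simpa using hmod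
      simp only [hle, dite_true]
      rw [if_neg hmod, ih (by omega)]
      constructor
      · intro h i hsq
        cases i with
        | zero => simpa using hm
        | succ i =>
            have he : d + 2*(((i:Nat)+1 : Nat) : Int) = d + 2 + 2*(i:Int) := by
              push_cast; ring
            rw [he] at hsq ⊢
            exact h i hsq
      · intro h i hsq
        have he : d + 2*(((i:Nat)+1 : Nat) : Int) = d + 2 + 2*(i:Int) := by
          push_cast; ring
        rw [← he] at hsq ⊢
        exact h (i+1) hsq
  | case3 d hgt =>
      intro hd
      rw [trialB]
      simp only [hgt, dite_false]
      constructor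
      · intro _ i hsq
        exfalso
        have hi : (0:Int) ≤ (i:Int) := by positivity
        nlinarith
      · intro _; trivial

-- the two divisor searches agree for odd non-multiples-of-5 candidates ≥ 5
lemma bridge (val : Int) (_hv : 5 ≤ val)
    (h2 : ¬ PySem.Int.mod val 2 = 0) (_h5 : ¬ PySem.Int.mod val 5 = 0) :
    ((∀ j ∈ PySem.List.pyRange 3 (PySem.Int.floordiv val 2 + 1) 1, ¬ PySem.Int.mod val j = 0) ↔
     (∀ i : Nat, (3 + 2*(i:Int)) * (3 + 2*(i:Int)) ≤ val → ¬ PySem.Int.mod val (3 + 2*(i:Int)) = 0)) := by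
  have hodd : ¬ (2:Int) ∣ val := by
    rw [← PySem.Int.mod_eq_zero_iff_dvd]; exact h2
  constructor
  · intro hA i hsq
    apply hA
    rw [PySem.List.mem_pyRange_one]
    have hle : 3 + 2*(i:Int) ≤ PySem.Int.floordiv val 2 := by
      rw [PySem.Int.le_floordiv_iff_mul_le (by omega)]
      have hi : (0:Int) ≤ (i:Int) := by positivity
      nlinarith
    omega
  · intro hB j hj
    rw [PySem.List.mem_pyRange_one] at hj
    obtain ⟨hj3, hjlt⟩ := hj
    intro hmod
    have hdvd : j ∣ val := (PySem.Int.mod_eq_zero_iff_dvd val j).mp hmod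
    have hjv : j * 2 ≤ val := by
      rw [← PySem.Int.le_floordiv_iff_mul_le (by omega)]; omega
    obtain ⟨c, hc⟩ := hdvd
    have hjodd : ¬ (2:Int) ∣ j := by
      intro h; exact hodd (dvd_trans h ⟨c, hc⟩)
    have hcodd : ¬ (2:Int) ∣ c := by
      intro h; exact hodd (by rw [hc]; exact Dvd.dvd.mul_left h j)
    have hc2 : 2 ≤ c := by nlinarith
    have hc3 : 3 ≤ c := by omega
    set d := min j c with hd
    have hd3 : 3 ≤ d := le_min hj3 hc3
    have hdodd : ¬ (2:Int) ∣ d := by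
      rcases min_cases j c with ⟨h, _⟩ | ⟨h, _⟩ <;> rw [hd, h] <;> assumption
    have hdsq : d * d ≤ val := by
      rw [hc]
      have h1 : d ≤ j := min_le_left _ _
      have h2' : d ≤ c := min_le_right _ _
      nlinarith
    have hddvd : d ∣ val := by
      rcases min_cases j c with ⟨h, _⟩ | ⟨h, _⟩ <;> rw [hd, h, hc]
      · exact Dvd.intro c rfl
      · exact Dvd.intro_left j rfl
    obtain ⟨i, hi⟩ : ∃ i : Nat, d = 3 + 2*(i:Int) := by
      refine ⟨((d - 3)/2).toNat, ?_⟩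
      omega
    rw [hi] at hdsq hddvd
    exact hB i hdsq ((PySem.Int.mod_eq_zero_iff_dvd val _).mpr hddvd)

-- the two candidate tests agree from 5 on
lemma counted_eq (val : Int) (hv : 5 ≤ val) :
    notSieveInnerA val (PySem.List.pyRange 3 (PySem.Int.floordiv val 2 + 1) 1) = countedB val := by
  by_cases h2 : PySem.Int.mod val 2 = 0
  · rw [innerA_true val (Or.inl h2)]
    unfold countedB
    rw [show (PySem.Int.mod val 2 == 0) = true by rw [beq_iff_eq]; exact h2, Bool.true_or,
        if_pos rfl]
  · by_cases h5 : PySem.Int.mod val 5 = 0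
    · rw [innerA_true val (Or.inr h5)]
      unfold countedB
      rw [show (PySem.Int.mod val 5 == 0) = true by rw [beq_iff_eq]; exact h5, Bool.or_true,
          if_pos rfl]
    · have hA := innerA_char val h2 h5 (PySem.List.pyRange 3 (PySem.Int.floordiv val 2 + 1) 1)
      have hB := trialB_char val 3 (by omega)
      have hbr := bridge val hv h2 h5
      have hc : countedB val = trialB val 3 := by
        simp only [countedB]
        rw [if_neg]
        simp only [Bool.or_eq_true, beq_iff_eq, not_or]
        exact ⟨h2, h5⟩
      rw [hc, Bool.eq_iff_iff, hA, hB]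
      exact hbr

-- a rejected candidate is odd, so the next one is even and counted
lemma counted_next (val : Int) (h : countedB (val + 1) = false) : countedB (val + 2) = true := by
  have h2 : ¬ PySem.Int.mod (val + 1) 2 = 0 := by
    intro hm
    unfold countedB at h
    rw [show (PySem.Int.mod (val + 1) 2 == 0) = true by rw [beq_iff_eq]; exact hm, Bool.true_or,
        if_pos rfl] at h
    exact Bool.noConfusion h
  have hnd : ¬ (2:Int) ∣ (val + 1) := by
    rw [← PySem.Int.mod_eq_zero_iff_dvd]; exact h2
  have hd : (2:Int) ∣ (val + 2) := by omega
  have hm : PySem.Int.mod (val + 2) 2 = 0 := (PySem.Int.mod_eq_zero_iff_dvd _ _).mpr hd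
  unfold countedB
  rw [show (PySem.Int.mod (val + 2) 2 == 0) = true by rw [beq_iff_eq]; exact hm, Bool.true_or,
      if_pos rfl]

-- the two while-loops agree: 2*(m+1) iterations of fuel always suffice for A
lemma loop_eq : ∀ m : Nat, ∀ fuel : Nat, ∀ val : Int, 4 ≤ val → 2*(m+1) ≤ fuel →
    notSieveLoopA fuel val ((m:Int)+1) = notSieveLoopB (m+1) val := by
  intro m
  induction m with
  | zero =>
      intro fuel val hval hfuel
      obtain ⟨f, rfl⟩ : ∃ f, fuel = f + 1 := ⟨fuel - 1, by omega⟩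
      conv_rhs => rw [notSieveLoopB]
      simp only [notSieveLoopA]
      rw [counted_eq (val + 1) (by omega)]
      by_cases hcv : countedB (val + 1) = true
      · rw [hcv]
        norm_num [notSieveLoopB]
      · have hcf : countedB (val + 1) = false := by
          cases hb : countedB (val + 1)
          · rfl
          · exact absurd hb hcv
        rw [hcf]
        norm_num [notSieveLoopB]
        obtain ⟨f', rfl⟩ : ∃ f', f = f' + 1 := ⟨f - 1, by omega⟩
        simp only [notSieveLoopA]
        rw [counted_eq (val + 1 + 1) (by omega), show val + 1 + 1 = val + 2 by ring,
            counted_next val hcf]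
        norm_num
  | succ m ih =>
      intro fuel val hval hfuel
      obtain ⟨f, rfl⟩ : ∃ f, fuel = f + 1 := ⟨fuel - 1, by omega⟩
      conv_rhs => rw [notSieveLoopB]
      simp only [notSieveLoopA]
      rw [counted_eq (val + 1) (by omega)]
      by_cases hcv : countedB (val + 1) = true
      · simp only [hcv, if_true]
        rw [if_neg (by simp only [beq_iff_eq]; push_cast; omega)]
        rw [show (((m+1 : Nat)) : Int) + 1 - 1 = (m:Int) + 1 by push_cast; ring]
        rw [ih f (val + 1) (by omega) (by omega)]
      · have hcf : countedB (val + 1) = false := by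
          cases hb : countedB (val + 1)
          · rfl
          · exact absurd hb hcv
        simp only [hcf, Bool.false_eq_true, if_false]
        rw [if_neg (by simp only [beq_iff_eq]; push_cast; omega)]
        obtain ⟨f', rfl⟩ : ∃ f', f = f' + 1 := ⟨f - 1, by omega⟩
        simp only [notSieveLoopA]
        rw [counted_eq (val + 1 + 1) (by omega), show val + 1 + 1 = val + 2 by ring,
            counted_next val hcf]
        simp only [if_true]
        rw [if_neg (by simp only [beq_iff_eq]; push_cast; omega)]
        rw [show (((m+1 : Nat)) : Int) + 1 - 1 = (m:Int) + 1 by push_cast; ring]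
        rw [ih f' (val + 2) (by omega) (by omega)]

-- ===== VERDICT (by name: the statement is the Claim_ definition above) =====
theorem not_sieve_2_spec : Claim_equal_not_sieve_2 := by
  intro n _ hpre
  unfold Pre_not_sieve_2 at hpre
  unfold Spec_not_sieve_2 not_sieve_2 not_sieve_2_alt
  by_cases h1 : n = 1
  · simp [h1]
  · by_cases h2 : n = 2
    · simp [h2]
    · simp only [beq_iff_eq, h1, h2, if_false]
      have h3 : 3 ≤ n := by omega
      obtain ⟨m, hm⟩ : ∃ m : Nat, n - 2 = (m:Int) + 1 := ⟨(n - 3).toNat, by omega⟩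
      rw [hm, show ((m:Int) + 1).toNat = m + 1 by omega,
          loop_eq m (2 * ((m:Int) + 1)).toNat 4 (by omega) (by omega)]
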